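-- pv_equiv track=rewrite | github.com/j-miniee/ps | dongbinna/2. 그리디 & 구현/02_implementation/시각.py | dongbin
-- ===== SOURCE A (Python) =====
-- def dongbin(n):
--     cnt = 0
--     for h in range(n+1):
--         for m in range(60):
--             for s in range(60):
--                 time = str(h) + str(m) + str(s)
--                 if '3' in time:
--                     cnt += 1
--     return cnt
-- ===== SOURCE B (Python) =====
-- def dongbin(n):
--     # Per-hour combinatorics: within one hour, every (m, s) pair counts when the
--     # hour's digits contain '3'; otherwise exactly 3600 - no3*no3 pairs count,
--     # where no3 is the number of values 0..59 whose digits lack '3'.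
--     no3 = 0
--     for v in range(60):
--         if '3' not in str(v):
--             no3 += 1
--     safe = 3600 - no3 * no3
--     cnt = 0
--     for h in range(n + 1):
--         cnt += 3600 if '3' in str(h) else safe
--     return cnt
-- ===== Notes on version B (the rewrite author's own statement) =====
-- stated objective: faster
-- what changed: B replaces the 3600-iteration minute/second double loop per hour by a per-hour combinatorial count (3600, or 3600 - no3^2 where no3 = #{0..59 without digit 3}), looping over hours only.
import Mathlib
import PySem

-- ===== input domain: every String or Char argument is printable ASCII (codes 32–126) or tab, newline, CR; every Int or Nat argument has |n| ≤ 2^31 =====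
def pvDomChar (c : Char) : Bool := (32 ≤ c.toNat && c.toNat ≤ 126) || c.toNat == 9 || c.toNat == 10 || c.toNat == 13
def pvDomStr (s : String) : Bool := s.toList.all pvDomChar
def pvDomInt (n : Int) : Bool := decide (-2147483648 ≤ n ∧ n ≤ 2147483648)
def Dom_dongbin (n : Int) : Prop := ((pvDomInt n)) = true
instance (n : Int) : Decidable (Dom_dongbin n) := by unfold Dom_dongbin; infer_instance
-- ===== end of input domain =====

-- B replaces the per-hour 60×60 minute/second scan by a combinatorial per-hour count; objective: faster (constant-factor).
-- Strings are ported on the List Char side (PySem.Chars), exact for str(int) and 'sub in s'.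

-- ===== PORT A =====
def dongbin (n : Int) : Int :=
  (PySem.List.pyRange 0 (n + 1) 1).foldl (fun cnt h =>
    (PySem.List.pyRange 0 60 1).foldl (fun cnt m =>
      (PySem.List.pyRange 0 60 1).foldl (fun cnt s =>
        -- time = str(h) + str(m) + str(s); if '3' in time: cnt += 1
        if PySem.Chars.isIn ['3'] (PySem.Int.toChars h ++ PySem.Int.toChars m ++ PySem.Int.toChars s)
        then cnt + 1 else cnt) cnt) cnt) 0

-- ===== PORT B =====
def dongbin_alt (n : Int) : Int :=
  let no3 : Int := (PySem.List.pyRange 0 60 1).foldl (fun no3 v =>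
    if !(PySem.Chars.isIn ['3'] (PySem.Int.toChars v)) then no3 + 1 else no3) 0
  let safe : Int := 3600 - no3 * no3
  (PySem.List.pyRange 0 (n + 1) 1).foldl (fun cnt h =>
    cnt + (if PySem.Chars.isIn ['3'] (PySem.Int.toChars h) then 3600 else safe)) 0

-- ===== PRECONDITION & SPEC =====
def Spec_dongbin (n : Int) (out : Int) : Prop := out = dongbin_alt n
instance (n : Int) (out : Int) : Decidable (Spec_dongbin n out) := by unfold Spec_dongbin; infer_instance

-- ===== CLAIM (what is proved, stated in full; the proofs are below) =====
def Claim_equal_dongbin : Prop := ∀ (n : Int), Dom_dongbin n → Spec_dongbin n (dongbin n)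

-- ===== LEMMAS AND PROOFS =====

-- A single character is in a concatenation iff it is in one of the parts.
theorem isIn_singleton_append (c : Char) (a b : List Char) :
    PySem.Chars.isIn [c] (a ++ b) = (PySem.Chars.isIn [c] a || PySem.Chars.isIn [c] b) := by
  have h1 : ∀ l : List Char, PySem.Chars.isIn [c] l = true ↔ c ∈ l := by
    intro l
    rw [PySem.Chars.isIn_iff_infix]
    constructor
    · intro h; exact (List.singleton_sublist).1 h.sublist
    · intro h
      obtain ⟨s, t, rfl⟩ := List.append_of_mem h
      exact ⟨s, t, by simp⟩
  rcases hb : (PySem.Chars.isIn [c] a || PySem.Chars.isIn [c] b) with _ | _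
  · simp only [Bool.or_eq_false_iff] at hb
    have : ¬ c ∈ a ++ b := by
      simp only [List.mem_append]
      rintro (h | h)
      · exact absurd ((h1 a).2 h) (by simp [hb.1])
      · exact absurd ((h1 b).2 h) (by simp [hb.2])
    cases hx : PySem.Chars.isIn [c] (a ++ b)
    · rfl
    · exact absurd ((h1 _).1 hx) this
  · simp only [Bool.or_eq_true] at hb
    apply (h1 _).2
    rw [List.mem_append]
    rcases hb with h | h
    · exact Or.inl ((h1 a).1 h)
    · exact Or.inr ((h1 b).1 h)

-- A's inner double loop for a fixed hour h equals the combinatorial per-hour count.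
theorem inner_eq (h cnt : Int) :
    (PySem.List.pyRange 0 60 1).foldl (fun cnt m =>
      (PySem.List.pyRange 0 60 1).foldl (fun cnt s =>
        if PySem.Chars.isIn ['3'] (PySem.Int.toChars h ++ PySem.Int.toChars m ++ PySem.Int.toChars s)
        then cnt + 1 else cnt) cnt) cnt
    = cnt + (if PySem.Chars.isIn ['3'] (PySem.Int.toChars h) then 3600 else 1575) := by
  simp only [PySem.List.foldl_count_if, PySem.List.foldl_add]
  congr 1
  simp only [isIn_singleton_append]
  rcases hch : PySem.Chars.isIn ['3'] (PySem.Int.toChars h) with _ | _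
  · simp only [Bool.false_or]
    decide
  · simp only [Bool.true_or]
    decide

-- ===== VERDICT (by name: the statement is the Claim_ definition above) =====
theorem dongbin_spec : Claim_equal_dongbin := by
  intro n _
  show dongbin n = dongbin_alt n
  have hno3 : (PySem.List.pyRange 0 60 1).foldl (fun no3 v =>
      if !(PySem.Chars.isIn ['3'] (PySem.Int.toChars v)) then no3 + 1 else no3) (0 : Int) = 45 := by
    decide
  have hfun : (fun (cnt h : Int) =>
      (PySem.List.pyRange 0 60 1).foldl (fun cnt m =>
        (PySem.List.pyRange 0 60 1).foldl (fun cnt s =>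
          if PySem.Chars.isIn ['3'] (PySem.Int.toChars h ++ PySem.Int.toChars m ++ PySem.Int.toChars s)
          then cnt + 1 else cnt) cnt) cnt)
      = (fun (cnt h : Int) => cnt + (if PySem.Chars.isIn ['3'] (PySem.Int.toChars h) then 3600 else 1575)) :=
    funext fun cnt => funext fun h => inner_eq h cnt
  simp only [dongbin, dongbin_alt, hno3, show ((3600 : Int) - 45 * 45) = 1575 from by norm_num]
  rw [hfun]
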